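-- pv_equiv track=rewrite | github.com/Timcuan/Clanknclaw-v2 | clankandclaw/core/workers/gecko_detector_worker.py | _prioritize_networks
-- ===== SOURCE A (Python) =====
-- def _prioritize_networks(networks: list[str]) -> list[str]:
--     priority = {"base": 0, "solana": 1, "bsc": 2, "eth": 3}
--     deduped: list[str] = []
--     seen: set[str] = set()
--     for network in networks:
--         if network in seen:
--             continue
--         seen.add(network)
--         deduped.append(network)
--     return sorted(deduped, key=lambda net: (priority.get(net, 10), net))
-- ===== SOURCE B (Python) =====
-- def _prioritize_networks(networks: list[str]) -> list[str]:
--     priority = {"base": 0, "solana": 1, "bsc": 2, "eth": 3}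
--     nets = set(networks)
--     out: list[str] = []
--     for p in sorted({priority.get(n, 10) for n in nets}):
--         out.extend(sorted(n for n in nets if priority.get(n, 10) == p))
--     return out
-- ===== Notes on version B (the rewrite author's own statement) =====
-- stated objective: alternative
-- what changed: Replaces A's single comparison sort of the deduped list under a composite (priority, name) key by a priority-bucketed pass: dedup into a set, group by priority value, then emit the distinct priorities in ascending order with each bucket sorted lexicographically.
import Mathlib
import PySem

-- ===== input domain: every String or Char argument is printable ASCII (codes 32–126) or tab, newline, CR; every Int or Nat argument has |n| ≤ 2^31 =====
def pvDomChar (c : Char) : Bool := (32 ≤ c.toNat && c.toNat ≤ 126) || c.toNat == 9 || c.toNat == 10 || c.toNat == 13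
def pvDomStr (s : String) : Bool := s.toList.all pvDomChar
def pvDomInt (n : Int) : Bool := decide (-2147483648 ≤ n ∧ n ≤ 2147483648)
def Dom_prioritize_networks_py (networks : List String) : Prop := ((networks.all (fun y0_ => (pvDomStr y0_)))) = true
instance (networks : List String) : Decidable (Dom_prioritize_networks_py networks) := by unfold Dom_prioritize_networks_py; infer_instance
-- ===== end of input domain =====

-- B replaces A's single composite-key sort of the deduped list by a priority-bucketed
-- pass (distinct priorities in ascending order, each bucket sorted lexicographically);
-- objective: alternative decomposition, same observable result.

-- ===== PORT A =====
-- the priority dict A builds, and the lookup priority.get(net, 10)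
def pvPriority : PySem.Dict String Int :=
  PySem.Dict.ofList [("base", 0), ("solana", 1), ("bsc", 2), ("eth", 3)]
def pvPrio (net : String) : Int := PySem.Dict.getD pvPriority net 10

def prioritize_networks_py (networks : List String) : List String :=
  PySem.List.sorted2
    (networks.foldl
      (fun (st : List String × PySem.Set String) network =>
        if PySem.Set.contains st.2 network then st
        else (st.1 ++ [network], PySem.Set.add st.2 network))
      ([], PySem.Set.empty)).1
    (fun net => pvPrio net) (fun net => net) false

-- ===== PORT B =====
def prioritize_networks_py_alt (networks : List String) : List String :=
  (PySem.List.sorted (PySem.Set.ofList ((PySem.Set.ofList networks).map pvPrio)) (fun p => p) false).foldl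
    (fun out p =>
      out ++ PySem.List.sorted ((PySem.Set.ofList networks).filter (fun n => pvPrio n == p)) (fun n => n) false)
    []

-- ===== PRECONDITION & SPEC =====
def Spec_prioritize_networks_py (networks : List String) (out : List String) : Prop := out = prioritize_networks_py_alt networks
instance (networks : List String) (out : List String) : Decidable (Spec_prioritize_networks_py networks out) := by unfold Spec_prioritize_networks_py; infer_instance

-- ===== CLAIM (what is proved, stated in full; the proofs are below) =====
def Claim_equal_prioritize_networks_py : Prop := ∀ (networks : List String), Dom_prioritize_networks_py networks → Spec_prioritize_networks_py networks (prioritize_networks_py networks)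

-- ===== LEMMAS AND PROOFS =====

-- the composite key both programs order by
def pvKey (net : String) : Lex (Int × String) := toLex (pvPrio net, net)

-- A's dedup loop: the deduped list and the seen set are the same list at every step,
-- and that list is set(networks) in first-insertion order.
theorem pvDedup_eq (networks : List String) :
    (networks.foldl
      (fun (st : List String × PySem.Set String) network =>
        if PySem.Set.contains st.2 network then st
        else (st.1 ++ [network], PySem.Set.add st.2 network))
      ([], PySem.Set.empty)).1 = PySem.Set.ofList networks := by
  rw [PySem.Set.ofList_eq_foldl]
  have main : ∀ (l : List String) (s : PySem.Set String),
      (l.foldl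
        (fun (st : List String × PySem.Set String) network =>
          if PySem.Set.contains st.2 network then st
          else (st.1 ++ [network], PySem.Set.add st.2 network))
        (s, s)).1 = l.foldl PySem.Set.add s := by
    intro l
    induction l with
    | nil => intro s; rfl
    | cons x t ih =>
      intro s
      simp only [List.foldl_cons]
      by_cases h : x ∈ s
      · have hadd : PySem.Set.add s x = s := by simp [PySem.Set.add, h]
        simpa [h, hadd] using ih s
      · have hadd : PySem.Set.add s x = s ++ [x] := by simp [PySem.Set.add, h]
        simpa [h, hadd] using ih (s ++ [x])
  exact main networks []

-- sorting by the tuple key (prio, net) is sorting by the lexicographic product key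
theorem pvSorted2_eq_sorted_lex (xs : List String) :
    PySem.List.sorted2 xs (fun net => pvPrio net) (fun net => net) false
      = PySem.List.sorted xs pvKey false := by
  have hbef : (fun a b : String =>
        decide (pvPrio a < pvPrio b) || (!decide (pvPrio b < pvPrio a) && decide (a < b)))
      = (fun a b : String => decide (pvKey a < pvKey b)) := by
    funext a b
    rcases lt_trichotomy (pvPrio a) (pvPrio b) with h | h | h
    · simp [pvKey, Prod.Lex.lt_iff, h]
    · simp [pvKey, Prod.Lex.lt_iff, h]
    · simp [pvKey, Prod.Lex.lt_iff, not_lt_of_gt h, h, ne_of_gt h]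
  show List.foldl
      (fun acc x => PySem.List.insertBy
        (fun a b : String =>
          decide (pvPrio a < pvPrio b) || (!decide (pvPrio b < pvPrio a) && decide (a < b)))
        x acc) [] xs
    = List.foldl
      (fun acc x => PySem.List.insertBy (fun a b : String => decide (pvKey a < pvKey b)) x acc) [] xs
  rw [hbef]

-- bucket decomposition: flatMap of the per-priority filters is a permutation of S
theorem pvFlatMap_filter_perm (S : List String) (ps : List Int)
    (hnd : ps.Nodup) (hmem : ∀ x ∈ S, pvPrio x ∈ ps) :
    (ps.flatMap (fun p => S.filter (fun n => pvPrio n == p))).Perm S := by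
  induction ps generalizing S with
  | nil =>
    have hS : S = [] := List.eq_nil_iff_forall_not_mem.mpr (fun x hx => by simpa using hmem x hx)
    simp [hS]
  | cons p t ih =>
    simp only [List.flatMap_cons]
    have hrw : t.flatMap (fun q => S.filter (fun n => pvPrio n == q))
        = t.flatMap (fun q => (S.filter (fun n => !(pvPrio n == p))).filter (fun n => pvPrio n == q)) := by
      simp only [List.flatMap_def]
      refine congrArg List.flatten (List.map_congr_left ?_)
      intro q hq
      rw [List.filter_filter]
      refine (List.filter_congr ?_).symm
      intro x _
      have hqp : q ≠ p := fun hqp => (List.nodup_cons.mp hnd).1 (hqp ▸ hq)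
      by_cases hx : pvPrio x = q
      · simp [hx, hqp]
      · simp [hx]
    have hperm : (t.flatMap (fun q =>
        (S.filter (fun n => !(pvPrio n == p))).filter (fun n => pvPrio n == q))).Perm
        (S.filter (fun n => !(pvPrio n == p))) := by
      refine ih _ (List.nodup_cons.mp hnd).2 ?_
      intro x hx
      rcases List.mem_filter.mp hx with ⟨hxS, hxp⟩
      have := hmem x hxS
      simp only [List.mem_cons] at this
      rcases this with h | h
      · exact absurd (by simpa using h) (by simpa using hxp)
      · exact h
    have h1 : (S.filter (fun n => pvPrio n == p) ++
          t.flatMap (fun q => S.filter (fun n => pvPrio n == q))).Perm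
        (S.filter (fun n => pvPrio n == p) ++ S.filter (fun n => !(pvPrio n == p))) := by
      rw [hrw]; exact List.Perm.append_left _ hperm
    exact h1.trans (List.filter_append_perm _ S)

-- B's output is pairwise strictly increasing in the composite key
theorem pvB_pairwise (S : List String) (hS : S.Nodup) (ps : List Int)
    (hps : ps.Pairwise (· < ·)) :
    (ps.flatMap (fun p =>
        PySem.List.sorted (S.filter (fun n => pvPrio n == p)) (fun n => n) false)).Pairwise
      (fun a b => pvKey a < pvKey b) := by
  induction ps with
  | nil => simp
  | cons p t ih =>
    simp only [List.flatMap_cons]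
    rw [List.pairwise_append]
    have hbl : ∀ q (b : String),
        b ∈ PySem.List.sorted (S.filter (fun n => pvPrio n == q)) (fun n => n) false →
        pvPrio b = q := by
      intro q b hb
      have := (PySem.List.mem_sorted _ _ _ _).mp hb
      simpa using (List.mem_filter.mp this).2
    refine ⟨?_, ih (List.pairwise_cons.mp hps).2, ?_⟩
    · -- within the p-bucket: equal priorities, strictly increasing strings
      have hnd : (PySem.List.sorted (S.filter (fun n => pvPrio n == p)) (fun n => n) false).Nodup :=
        (PySem.List.sorted_perm _ _ _).nodup_iff.mpr (hS.filter _)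
      have hle : (PySem.List.sorted (S.filter (fun n => pvPrio n == p)) (fun n => n) false).Pairwise
          (fun a b : String => a ≤ b) := PySem.List.sorted_pairwise _ _
      refine (hle.and hnd).imp_of_mem ?_
      intro a b ha hb hab
      have hlt : a < b := lt_of_le_of_ne hab.1 hab.2
      simp [pvKey, Prod.Lex.lt_iff, hbl p a ha, hbl p b hb, hlt]
    · -- across buckets: the priority strictly increases
      intro a ha b hb
      rcases List.mem_flatMap.mp hb with ⟨q, hq, hbq⟩
      have hpq : p < q := (List.pairwise_cons.mp hps).1 q hq
      have : pvPrio a < pvPrio b := by rw [hbl p a ha, hbl q b hbq]; exact hpq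
      simp [pvKey, Prod.Lex.lt_iff, this]

-- ===== VERDICT (by name: the statement is the Claim_ definition above) =====
theorem prioritize_networks_py_spec : Claim_equal_prioritize_networks_py := by
  intro networks _
  unfold Spec_prioritize_networks_py prioritize_networks_py prioritize_networks_py_alt
  rw [pvDedup_eq, pvSorted2_eq_sorted_lex]
  rw [PySem.List.foldl_append_eq_flatMap, List.nil_append]
  set S : List String := PySem.Set.ofList networks with hSdef
  set ps := PySem.List.sorted (PySem.Set.ofList (S.map pvPrio)) (fun p => p) false with hps
  have hSnd : S.Nodup := PySem.Set.nodup_ofList networks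
  have hpsnd : ps.Nodup := by
    have := PySem.List.sorted_perm (PySem.Set.ofList (S.map pvPrio)) (fun p => p) false
    exact this.nodup_iff.mpr (PySem.Set.nodup_ofList _)
  have hpslt : ps.Pairwise (· < ·) := PySem.List.sorted_ofList_pairwise_lt _
  have hmem : ∀ x ∈ S, pvPrio x ∈ ps := by
    intro x hx
    have : pvPrio x ∈ PySem.Set.ofList (S.map pvPrio) :=
      (PySem.Set.mem_ofList _ _).mpr (List.mem_map_of_mem hx)
    simpa [hps, PySem.List.mem_sorted] using this
  refine PySem.List.sorted_eq_of_perm_of_pairwise_lt S _ pvKey ?_ ?_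
  · -- permutation
    have h1 : ∀ p, (PySem.List.sorted (S.filter (fun n => pvPrio n == p)) (fun n => n) false).Perm
        (S.filter (fun n => pvPrio n == p)) := fun p => PySem.List.sorted_perm _ _ _
    have h2 : (ps.flatMap (fun p =>
        PySem.List.sorted (S.filter (fun n => pvPrio n == p)) (fun n => n) false)).Perm
        (ps.flatMap (fun p => S.filter (fun n => pvPrio n == p))) := by
      induction ps with
      | nil => simp
      | cons p t ih => simpa [List.flatMap_cons] using (h1 p).append ih
    exact h2.trans (pvFlatMap_filter_perm S ps hpsnd hmem)
  · exact pvB_pairwise S hSnd ps hpslt
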